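-- pv_equiv track=rewrite | github.com/Sokolovskaia/ShopRevenue | app/shops.py | the_worst_shop_on_daily_revenue_from_week
-- ===== SOURCE A (Python) =====
-- def the_worst_shop_on_daily_revenue_from_week(weekly_revenue):  # 4
--     min_revenue_all = []
--     for shop_revenue in weekly_revenue:
--         min_revenue_all.append(min(shop_revenue))
--     worst_shops = []
--     for shop_index, min_revenue in enumerate(min_revenue_all):
--         if min_revenue == min(min_revenue_all):
--             worst_shops.append(shop_index)
--     return worst_shops
-- ===== SOURCE B (Python) =====
-- def the_worst_shop_on_daily_revenue_from_week(weekly_revenue):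
--     best = None
--     worst_shops = []
--     for shop_index, shop_revenue in enumerate(weekly_revenue):
--         m = min(shop_revenue)
--         if best is None or m < best:
--             best = m
--             worst_shops = [shop_index]
--         elif m == best:
--             worst_shops.append(shop_index)
--     return worst_shops
-- ===== Notes on version B (the rewrite author's own statement) =====
-- stated objective: alternative
-- what changed: Single pass maintaining a running best minimum and the current list of worst indices, instead of building a list of per-shop minima and then rescanning it while recomputing min of that list inside the loop.
import Mathlib
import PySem

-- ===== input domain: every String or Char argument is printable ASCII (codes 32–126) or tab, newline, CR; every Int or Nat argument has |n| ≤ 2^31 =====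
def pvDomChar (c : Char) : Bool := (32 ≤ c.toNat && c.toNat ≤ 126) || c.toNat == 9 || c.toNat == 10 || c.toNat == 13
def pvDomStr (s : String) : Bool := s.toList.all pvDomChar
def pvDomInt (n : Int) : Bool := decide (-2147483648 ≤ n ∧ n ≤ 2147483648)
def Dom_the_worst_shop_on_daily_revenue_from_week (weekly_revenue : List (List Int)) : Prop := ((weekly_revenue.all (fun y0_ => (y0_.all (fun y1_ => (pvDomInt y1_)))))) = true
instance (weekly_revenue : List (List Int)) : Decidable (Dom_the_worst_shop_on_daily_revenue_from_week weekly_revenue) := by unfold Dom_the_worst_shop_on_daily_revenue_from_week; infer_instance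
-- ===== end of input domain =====

-- B replaces A's build-the-minima-list-then-rescan (recomputing min of that list per shop)
-- by one pass keeping a running best minimum and the current worst-index list in one pass (objective: alternative).

-- min(l) for a nonempty list; Pre_ guarantees nonemptiness (Python's min raises ValueError on an empty list).
def pvMinD (l : List Int) : Int := (PySem.List.min? l (fun x => x)).getD 0

-- ===== PORT A =====
def the_worst_shop_on_daily_revenue_from_week (weekly_revenue : List (List Int)) : List Int :=
  let min_revenue_all := weekly_revenue.foldl (fun acc shop_revenue => acc ++ [pvMinD shop_revenue]) []
  (PySem.List.enumerate min_revenue_all 0).foldl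
    (fun worst_shops p => if p.2 = pvMinD min_revenue_all then worst_shops ++ [p.1] else worst_shops) []

-- ===== PORT B =====
def pvAltStep (st : Option Int × List Int) (p : Int × List Int) : Option Int × List Int :=
  let m := pvMinD p.2
  match st.1 with
  | none => (some m, [p.1])
  | some b => if m < b then (some m, [p.1]) else if m = b then (st.1, st.2 ++ [p.1]) else st

def the_worst_shop_on_daily_revenue_from_week_alt (weekly_revenue : List (List Int)) : List Int :=
  ((PySem.List.enumerate weekly_revenue 0).foldl pvAltStep (none, [])).2

-- ===== PRECONDITION & SPEC =====
-- Pre_ excludes inputs containing an empty shop list, on which Python's min of that shop raises ValueError (in A and in B alike).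
def Pre_the_worst_shop_on_daily_revenue_from_week (weekly_revenue : List (List Int)) : Prop :=
  ∀ s ∈ weekly_revenue, s ≠ []
instance (weekly_revenue : List (List Int)) : Decidable (Pre_the_worst_shop_on_daily_revenue_from_week weekly_revenue) := by unfold Pre_the_worst_shop_on_daily_revenue_from_week; infer_instance

def pvWitness_the_worst_shop_on_daily_revenue_from_week : List (List Int) := [[3, 1], [0, 5], [0]]

def Spec_the_worst_shop_on_daily_revenue_from_week (weekly_revenue : List (List Int)) (out : List Int) : Prop := out = the_worst_shop_on_daily_revenue_from_week_alt weekly_revenue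
instance (weekly_revenue : List (List Int)) (out : List Int) : Decidable (Spec_the_worst_shop_on_daily_revenue_from_week weekly_revenue out) := by unfold Spec_the_worst_shop_on_daily_revenue_from_week; infer_instance

-- ===== CLAIM (what is proved, stated in full; the proofs are below) =====
def Claim_equal_the_worst_shop_on_daily_revenue_from_week : Prop := ∀ (weekly_revenue : List (List Int)), Dom_the_worst_shop_on_daily_revenue_from_week weekly_revenue → Pre_the_worst_shop_on_daily_revenue_from_week weekly_revenue → Spec_the_worst_shop_on_daily_revenue_from_week weekly_revenue (the_worst_shop_on_daily_revenue_from_week weekly_revenue)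

-- ===== LEMMAS AND PROOFS =====

-- A's filtering loop as a filter-map.
theorem filt_loop (g : Int) (l : List (Int × Int)) (acc : List Int) :
    l.foldl (fun ws p => if p.2 = g then ws ++ [p.1] else ws) acc
      = acc ++ (l.filter (fun p => p.2 = g)).map Prod.fst := by
  induction l generalizing acc with
  | nil => simp
  | cons q t ih =>
      by_cases h : q.2 = g <;> simp [List.foldl_cons, h, ih]

theorem enumerate_map (f : List Int → Int) (l : List (List Int)) (s : Int) :
    PySem.List.enumerate (l.map f) s
      = (PySem.List.enumerate l s).map (fun p => (p.1, f p.2)) := by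
  induction l generalizing s with
  | nil => simp [PySem.List.enumerate_nil]
  | cons x t ih => simp [PySem.List.enumerate_cons, ih]

-- B's running-state step on the minima list.
def pvStep2 (st : Option Int × List Int) (q : Int × Int) : Option Int × List Int :=
  match st.1 with
  | none => (some q.2, [q.1])
  | some b => if q.2 < b then (some q.2, [q.1]) else if q.2 = b then (st.1, st.2 ++ [q.1]) else st

-- The running-state fold computes (min of ms, indices achieving it), for any ms.
theorem core (ms : List Int) :
    (PySem.List.enumerate ms 0).foldl pvStep2 (none, [])
      = (PySem.List.min? ms (fun x => x),
         ((PySem.List.enumerate ms 0).filter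
            (fun q => q.2 = (PySem.List.min? ms (fun x => x)).getD 0)).map Prod.fst) := by
  induction ms using List.reverseRecOn with
  | nil => simp [PySem.List.enumerate_nil, PySem.List.min?]
  | append_singleton l x ih =>
      rw [PySem.List.enumerate_append, List.foldl_append, ih]
      have hsing : ∀ (st : Option Int × List Int) (s : Int),
          List.foldl pvStep2 st (PySem.List.enumerate [x] s) = pvStep2 st (s, x) := by
        intro st s
        simp [PySem.List.enumerate_cons, PySem.List.enumerate_nil]
      rw [hsing]
      have hone : ∀ s : Int, PySem.List.enumerate [x] s = [(s, x)] := by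
        intro s
        simp [PySem.List.enumerate_cons, PySem.List.enumerate_nil]
      rw [hone]
      cases l with
      | nil =>
          simp [PySem.List.enumerate_nil, pvStep2, PySem.List.min?]
      | cons h t =>
          have hmin : PySem.List.min? (h :: t) (fun x => x) = some (t.foldl min h) :=
            PySem.List.min?_id_cons h t
          have hmin' : PySem.List.min? (h :: t ++ [x]) (fun x => x)
              = some (min (t.foldl min h) x) := by
            have := PySem.List.min?_id_cons h (t ++ [x])
            simpa [List.foldl_append] using this
          set b := t.foldl min h with hb
          have hle : ∀ y ∈ (h :: t), b ≤ y := by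
            intro y hy
            simpa using PySem.List.min?_isMin hmin y hy
          rw [hmin, hmin']
          have hleP : ∀ q ∈ ((0, h) :: PySem.List.enumerate t 1), b ≤ q.2 := by
            intro q hq
            rcases List.mem_cons.mp hq with hq | hq
            · subst hq
              exact hle h (List.mem_cons_self)
            · rcases (PySem.List.mem_enumerate_iff _ _ _).mp hq with ⟨k, hk, hqe⟩
              apply hle
              subst hqe
              exact List.mem_cons_of_mem h (List.getElem_mem hk)
          rcases lt_trichotomy x b with hx | hx | hx
          · -- new strict minimum: reset
            have hmx : min b x = x := min_eq_right hx.le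
            have hfe : List.filter (fun q => decide (q.2 = x))
                (PySem.List.enumerate (h :: t) 0) = [] := by
              rw [List.filter_eq_nil_iff]
              intro q hq
              rcases (PySem.List.mem_enumerate_iff _ _ _).mp hq with ⟨k, hk, hqe⟩
              have hbq : b ≤ q.2 := by
                apply hle
                subst hqe
                exact List.getElem_mem hk
              simp only [decide_eq_true_eq]
              omega
            simp only [pvStep2, hmx, if_pos hx, Option.getD_some, List.filter_append]
            rw [hfe]
            simp
          · -- tie: append the new index
            have hmx : min b x = b := by omega
            have hxb : ¬ x < b := by omega
            simp only [pvStep2, if_neg hxb, if_pos hx, hmx, Option.getD_some, List.filter_append]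
            simp [hx]
            rfl
          · -- larger: unchanged
            have hmx : min b x = b := min_eq_left hx.le
            have hxb : ¬ x < b := not_lt.mpr hx.le
            have hxe : ¬ x = b := by omega
            simp only [pvStep2, if_neg hxb, if_neg hxe, hmx, Option.getD_some, List.filter_append]
            simp [hxe]
            rfl

theorem alt_eq (w : List (List Int)) :
    the_worst_shop_on_daily_revenue_from_week_alt w
      = ((PySem.List.enumerate (w.map pvMinD) 0).filter
           (fun q => q.2 = pvMinD (w.map pvMinD))).map Prod.fst := by
  unfold the_worst_shop_on_daily_revenue_from_week_alt
  have h1 : (PySem.List.enumerate w 0).foldl pvAltStep (none, [])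
      = (PySem.List.enumerate (w.map pvMinD) 0).foldl pvStep2 (none, []) := by
    rw [enumerate_map, List.foldl_map]
    rfl
  rw [h1, core]
  rfl

theorem a_eq (w : List (List Int)) :
    the_worst_shop_on_daily_revenue_from_week w
      = ((PySem.List.enumerate (w.map pvMinD) 0).filter
           (fun q => q.2 = pvMinD (w.map pvMinD))).map Prod.fst := by
  unfold the_worst_shop_on_daily_revenue_from_week
  have hms : w.foldl (fun acc s => acc ++ [pvMinD s]) [] = w.map pvMinD := by
    simpa using PySem.List.foldl_append_singleton_eq_map (f := pvMinD) (l := w) (acc := [])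
  simp only [hms]
  exact filt_loop _ _ []

-- ===== VERDICT (by name: the statement is the Claim_ definition above) =====
theorem the_worst_shop_on_daily_revenue_from_week_spec : Claim_equal_the_worst_shop_on_daily_revenue_from_week := by
  intro w _ _
  unfold Spec_the_worst_shop_on_daily_revenue_from_week
  rw [a_eq, alt_eq]
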